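-- pv_equiv track=rewrite | github.com/xntur/koan | app/questions/solutions/solutions.py | weirdshift
-- ===== SOURCE A (Python) =====
-- def weirdshift(inp, n):
--     strs = 'abcdefghijklmnopqrstuvwxyz'
--     def shift(inp):
--         chars = []
--         for char in inp:
--             if char not in ['a', 'e', 'o']:
--                 chars.append(strs[(strs.index(char) + 1) % 26])
--         return ''.join(chars)
--     for i in range(0, n):
--         inp = shift(inp)
--     return inp
-- ===== SOURCE B (Python) =====
-- def weirdshift(inp, n):
--     # Per-character closed form: a char survives n rounds iff its forward
--     # distance to the nearest of a/e/o is >= n; then it ends up shifted by n.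
--     if n <= 0:
--         return inp
--     out = []
--     for ch in inp:
--         o = ord(ch) - 97
--         d = min((0 - o) % 26, (4 - o) % 26, (14 - o) % 26)
--         if n <= d:
--             out.append(chr((o + n) % 26 + 97))
--     return ''.join(out)
-- ===== Notes on version B (the rewrite author's own statement) =====
-- stated objective: faster
-- what changed: Replaces the n-fold whole-string shifting loop by a per-character closed form: each char survives iff its forward distance to the nearest of a/e/o is at least n, and then equals start+n mod 26.
import Mathlib
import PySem

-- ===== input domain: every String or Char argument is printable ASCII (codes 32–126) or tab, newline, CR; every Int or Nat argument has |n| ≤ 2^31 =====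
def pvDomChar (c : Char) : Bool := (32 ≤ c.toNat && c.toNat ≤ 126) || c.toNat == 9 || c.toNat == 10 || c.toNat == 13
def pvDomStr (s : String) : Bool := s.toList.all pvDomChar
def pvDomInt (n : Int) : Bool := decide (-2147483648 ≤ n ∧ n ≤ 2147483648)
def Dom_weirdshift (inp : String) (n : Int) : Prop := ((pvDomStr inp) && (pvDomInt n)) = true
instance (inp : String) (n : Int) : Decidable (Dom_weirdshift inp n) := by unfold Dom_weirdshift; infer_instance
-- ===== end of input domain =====

-- B replaces A's n-fold whole-string shifting loop by a per-character closed form (asymptotically faster, O(L) vs O(n*L)).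


-- ===== PORT A =====
def pvStrs : List Char :=
  ['a','b','c','d','e','f','g','h','i','j','k','l','m','n','o','p','q','r','s','t','u','v','w','x','y','z']

-- A's inner `shift`: the accumulator loop, step for step.  `strs.index(char)` raises
-- ValueError for a char not in strs (Pre_ excludes those inputs, so the `.getD 0`
-- default is never reached on admitted inputs); the resulting index (i+1) % 26 is
-- always < 26, so `getD` is exact for `strs[...]`.
def pvShiftA (l : List Char) : List Char :=
  l.foldl (fun chars char =>
    if char ∉ (['a', 'e', 'o'] : List Char) then
      chars ++ [pvStrs.getD (((PySem.List.index? pvStrs char).getD 0 + 1) % 26) 'a']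
    else chars) []

def weirdshift (inp : String) (n : Int) : String :=
  String.ofList ((PySem.List.pyRange 0 n 1).foldl (fun s _ => pvShiftA s) inp.toList)

-- ===== PORT B =====
-- forward distance (in shifts) from letter offset o to the nearest of a/e/o
def pvD (o : Int) : Int :=
  min (min (PySem.Int.mod (0 - o) 26) (PySem.Int.mod (4 - o) 26)) (PySem.Int.mod (14 - o) 26)

-- Source B's loop body for one character: the appended piece (empty or a singleton)
def pvAltChar (n : Int) (ch : Char) : List Char :=
  let o : Int := (ch.toNat : Int) - 97
  if n ≤ pvD o then [Char.ofNat ((PySem.Int.mod (o + n) 26 + 97).toNat)] else []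

def weirdshift_alt (inp : String) (n : Int) : String :=
  if n ≤ 0 then inp
  else String.ofList (inp.toList.flatMap (pvAltChar n))

-- ===== PRECONDITION & SPEC =====
-- Pre_ excludes exactly the inputs where A raises ValueError: n ≥ 1 together with a
-- character outside 'a'..'z' (strs.index fails on it in the first round).
def Pre_weirdshift (inp : String) (n : Int) : Prop :=
  n ≤ 0 ∨ ∀ c ∈ inp.toList, 97 ≤ c.toNat ∧ c.toNat ≤ 122
instance (inp : String) (n : Int) : Decidable (Pre_weirdshift inp n) := by
  unfold Pre_weirdshift; infer_instance
def pvWitness_weirdshift : String × Int := ("", 0)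

def Spec_weirdshift (inp : String) (n : Int) (out : String) : Prop := out = weirdshift_alt inp n
instance (inp : String) (n : Int) (out : String) : Decidable (Spec_weirdshift inp n out) := by unfold Spec_weirdshift; infer_instance

-- ===== CLAIM (what is proved, stated in full; the proofs are below) =====
def Claim_equal_weirdshift : Prop := ∀ (inp : String) (n : Int), Dom_weirdshift inp n → Pre_weirdshift inp n → Spec_weirdshift inp n (weirdshift inp n)

-- ===== LEMMAS AND PROOFS =====

-- A's loop, iterated k times
def pvIter : Nat → List Char → List Char
  | 0, l => l
  | k + 1, l => pvIter k (pvShiftA l)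

-- what `shift` contributes for one character
def pvStep (c : Char) : List Char :=
  if c ∉ (['a', 'e', 'o'] : List Char) then
    [pvStrs.getD (((PySem.List.index? pvStrs c).getD 0 + 1) % 26) 'a']
  else []

lemma pvShiftA_eq_aux (l : List Char) (init : List Char) :
    l.foldl (fun chars char =>
      if char ∉ (['a', 'e', 'o'] : List Char) then
        chars ++ [pvStrs.getD (((PySem.List.index? pvStrs char).getD 0 + 1) % 26) 'a']
      else chars) init = init ++ l.flatMap pvStep := by
  induction l generalizing init with
  | nil => simp
  | cons c l ih =>
    rw [List.foldl_cons, List.flatMap_cons]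
    simp only [pvStep]
    by_cases h : c ∉ (['a', 'e', 'o'] : List Char)
    · rw [if_pos h, if_pos h, ih, List.append_assoc]
    · rw [if_neg h, if_neg h, ih]; simp

lemma pvShiftA_eq (l : List Char) : pvShiftA l = l.flatMap pvStep := by
  unfold pvShiftA; rw [pvShiftA_eq_aux]; rfl

lemma pvIter_nil (k : Nat) : pvIter k [] = [] := by
  induction k with
  | zero => rfl
  | succ k ih => simpa [pvIter, pvShiftA] using ih

lemma pvIter_append (k : Nat) (l₁ l₂ : List Char) :
    pvIter k (l₁ ++ l₂) = pvIter k l₁ ++ pvIter k l₂ := by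
  induction k generalizing l₁ l₂ with
  | zero => rfl
  | succ k ih =>
    have hsa : pvShiftA (l₁ ++ l₂) = pvShiftA l₁ ++ pvShiftA l₂ := by
      rw [pvShiftA_eq, pvShiftA_eq l₁, pvShiftA_eq l₂, List.flatMap_append]
    simp [pvIter, hsa, ih]

lemma pvIter_flat (k : Nat) (l : List Char) :
    pvIter k l = l.flatMap (fun c => pvIter k [c]) := by
  induction l with
  | nil => simp [pvIter_nil]
  | cons c l ih =>
    rw [show c :: l = [c] ++ l from rfl, pvIter_append, ih]
    simp

-- the 26 per-letter facts, checked by computation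
lemma pvTable : ∀ j : Nat, j < 26 →
    (pvStep (Char.ofNat (97 + j)) =
      if j = 0 ∨ j = 4 ∨ j = 14 then [] else [Char.ofNat (97 + (j + 1) % 26)]) ∧
    (pvD (j : Int) =
      if j = 0 ∨ j = 4 ∨ j = 14 then 0 else pvD (((j + 1) % 26 : Nat) : Int) + 1) := by
  decide

lemma pvD_nonneg (o : Int) : 0 ≤ pvD o := by
  have h := PySem.Int.mod_nonneg (0 - o) (b := 26) (by omega)
  have h2 := PySem.Int.mod_nonneg (4 - o) (b := 26) (by omega)
  have h3 := PySem.Int.mod_nonneg (14 - o) (b := 26) (by omega)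
  unfold pvD; omega

lemma pvIter_single : ∀ (k j : Nat), j < 26 →
    pvIter k [Char.ofNat (97 + j)] =
      if (k : Int) ≤ pvD (j : Int) then [Char.ofNat (97 + (j + k) % 26)] else [] := by
  intro k
  induction k with
  | zero =>
    intro j hj
    rw [if_pos (by exact_mod_cast pvD_nonneg (j : Int))]
    simp [pvIter, Nat.mod_eq_of_lt hj]
  | succ k ih =>
    intro j hj
    have h := pvTable j hj
    have hstep : pvIter (k + 1) [Char.ofNat (97 + j)] = pvIter k (pvStep (Char.ofNat (97 + j))) := by
      simp [pvIter, pvShiftA_eq]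
    by_cases hT : j = 0 ∨ j = 4 ∨ j = 14
    · rw [hstep, h.1, if_pos hT, pvIter_nil, h.2, if_pos hT]
      rw [if_neg (by push_cast; omega)]
    · rw [hstep, h.1, if_neg hT, ih ((j + 1) % 26) (Nat.mod_lt _ (by omega)), h.2, if_neg hT]
      have hchar : ((j + 1) % 26 + k) % 26 = (j + (k + 1)) % 26 := by omega
      rw [hchar]
      generalize pvD (((j + 1) % 26 : Nat) : Int) = d
      by_cases hc : (k : Int) ≤ d
      · rw [if_pos hc, if_pos (by omega)]
      · rw [if_neg hc, if_neg (by omega)]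

-- B's per-char piece equals the iterate's per-char piece, for lowercase c and n > 0
lemma pvAlt_eq (n : Int) (hn : 0 < n) (c : Char) (hc : 97 ≤ c.toNat ∧ c.toNat ≤ 122) :
    pvAltChar n c =
      if ((n.toNat : Int)) ≤ pvD ((c.toNat - 97 : Nat) : Int) then
        [Char.ofNat (97 + ((c.toNat - 97) + n.toNat) % 26)]
      else [] := by
  obtain ⟨h1, h2⟩ := hc
  have ho : ((c.toNat : Int) - 97) = ((c.toNat - 97 : Nat) : Int) := by omega
  have hnn : ((n.toNat : Int)) = n := by omega
  unfold pvAltChar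
  rw [ho, hnn]
  by_cases hcond : n ≤ pvD ((c.toNat - 97 : Nat) : Int)
  · rw [if_pos hcond, if_pos hcond]
    have hsum : ((c.toNat - 97 : Nat) : Int) + n = (((c.toNat - 97) + n.toNat : Nat) : Int) := by omega
    have hm : PySem.Int.mod (((c.toNat - 97) + n.toNat : Nat) : Int) 26
        = ((((c.toNat - 97) + n.toNat) % 26 : Nat) : Int) := by
      exact_mod_cast PySem.Int.mod_natCast ((c.toNat - 97) + n.toNat) 26
    have htn : (((((c.toNat - 97) + n.toNat) % 26 : Nat) : Int) + 97).toNat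
        = 97 + ((c.toNat - 97) + n.toNat) % 26 := by omega
    rw [hsum, hm, htn]
  · rw [if_neg hcond, if_neg hcond]

lemma pvFoldl_len (L : List Int) (l : List Char) :
    L.foldl (fun s _ => pvShiftA s) l = pvIter L.length l := by
  induction L generalizing l with
  | nil => rfl
  | cons x L ih => simp [pvIter, ih]

lemma pvFlat_congr (n : Int) (hn : 0 < n) :
    ∀ l : List Char, (∀ c ∈ l, 97 ≤ c.toNat ∧ c.toNat ≤ 122) →
      l.flatMap (fun c => pvIter n.toNat [c]) = l.flatMap (pvAltChar n) := by
  intro l hl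
  induction l with
  | nil => rfl
  | cons c l ih =>
    have hc := hl c (by simp)
    have hco : Char.ofNat (97 + (c.toNat - 97)) = c := by
      rw [show 97 + (c.toNat - 97) = c.toNat by omega, Char.ofNat_toNat]
    rw [List.flatMap_cons, List.flatMap_cons, ih (fun x hx => hl x (by simp [hx]))]
    congr 1
    rw [← hco, pvIter_single n.toNat (c.toNat - 97) (by omega), hco,
      pvAlt_eq n hn c hc]

-- ===== VERDICT (by name: the statement is the Claim_ definition above) =====
theorem weirdshift_spec : Claim_equal_weirdshift := by
  intro inp n _ hpre
  unfold Spec_weirdshift weirdshift weirdshift_alt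
  by_cases hn : n ≤ 0
  · rw [if_pos hn, PySem.List.pyRange_one_eq_nil hn]
    simp [String.ofList_toList]
  · have hn' : 0 < n := by omega
    have hlow : ∀ c ∈ inp.toList, 97 ≤ c.toNat ∧ c.toNat ≤ 122 := by
      rcases hpre with h | h
      · omega
      · exact h
    rw [if_neg hn, pvFoldl_len, PySem.List.length_pyRange_one]
    have : (n - 0).toNat = n.toNat := by omega
    rw [this, pvIter_flat, pvFlat_congr n hn' inp.toList hlow]
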